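-- pv_equiv track=rewrite | github.com/jJup0/LeetCode | Medium/2054. Two Best Non-Overlapping Events.py | maxTwoEvents1
-- ===== SOURCE A (Python) =====
-- import bisect
--
-- def maxTwoEvents1(events: list[list[int]]) -> int:
--     """
--     Sort events by start time, for each index `i` pre calculate the
--     largest value events[i:], then for each event bisect events array
--     to get the smallest compatible index and use the precomputed max
--     value for events including and after that event.
--
--     Complexity:
--         Time: O(n * log(n))
--         Space: O(n)
--     """
--     events.sort()
--     n = len(events)
--
--     # prefix max values, last index remains empty
--     max_values: list[int] = [0] * (len(events) + 1)
--     curr_max_value = 0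
--     # iterate through events in reverse order to easily find
--     # maximum value of events[i:].
--     for i, (_, _, val) in enumerate(reversed(events), start=1):
--         if val > curr_max_value:
--             curr_max_value = val
--         max_values[n - i] = curr_max_value
--
--     # for each event, bisect for the index of the earliest
--     # compatible event, and use the value of max_values[idx]
--     # to calculate the best pair value for that event
--     best_pair_value = 0
--     for _start, end, val in events:
--         lowest_compatible_idx = bisect.bisect_left(
--             events, end + 1, key=lambda x: x[0]
--         )
--         best_pair_value = max(
--             best_pair_value, val + max_values[lowest_compatible_idx]
--         )
--
--     return best_pair_value
-- ===== SOURCE B (Python) =====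
-- def maxTwoEvents1(events: list[list[int]]) -> int:
--     # Simpler quadratic scan instead of suffix-max table + bisect; the in-place
--     # sort is kept only because the original mutates its argument the same way
--     # (the answer itself does not depend on the order).
--     events.sort()
--     best = 0
--     for _s, e, v in events:
--         partner = 0
--         for s2, _e2, v2 in events:
--             if s2 > e:
--                 partner = max(partner, v2)
--         best = max(best, v + partner)
--     return best
-- ===== Notes on version B (the rewrite author's own statement) =====
-- stated objective: simpler
-- what changed: Replaces the suffix-max table plus per-event binary search (bisect) with a direct quadratic scan: for each event, a plain inner loop finds the best value among events starting strictly after its end; no auxiliary array, no bisect.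
import Mathlib
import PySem

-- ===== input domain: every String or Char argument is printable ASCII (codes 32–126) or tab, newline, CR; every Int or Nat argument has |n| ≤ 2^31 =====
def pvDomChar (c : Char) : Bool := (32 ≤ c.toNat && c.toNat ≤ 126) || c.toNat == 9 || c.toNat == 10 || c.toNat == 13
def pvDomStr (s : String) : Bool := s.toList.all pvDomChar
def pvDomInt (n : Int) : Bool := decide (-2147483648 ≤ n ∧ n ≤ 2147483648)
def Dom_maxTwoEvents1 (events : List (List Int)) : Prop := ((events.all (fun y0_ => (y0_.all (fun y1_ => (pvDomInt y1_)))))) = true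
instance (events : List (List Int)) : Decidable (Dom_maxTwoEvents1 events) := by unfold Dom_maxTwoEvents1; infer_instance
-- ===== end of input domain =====

-- B replaces A's suffix-max table + per-event bisect with a plain quadratic scan
-- (simpler, not faster); both sort the argument in place, the theorems are about
-- the return value only.


-- ===== PORT A =====
-- loop body of A's first pass ('if val > curr: curr = val; max_values[n-i] = curr'),
-- folded over enumerate(reversed(events), start=1); n = len(events)
def stepA (n : Nat) (st : Int × List Int) (p : Int × List Int) : Int × List Int :=
  let val := PySem.List.pyGetD p.2 2 0
  let curr := if val > st.1 then val else st.1
  (curr, PySem.List.pySetD st.2 ((n : Int) - p.1) curr)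

-- bisect.bisect_left(events, t, key=lambda x: x[0]) is ported as
-- PySem.List.bisectLeft on the key-mapped list (bisect with key compares
-- key(events[mid]) < t, i.e. bisect_left of t in [x[0] for x in events]).
def maxTwoEvents1 (events : List (List Int)) : Int :=
  let es := PySem.List.sorted events (fun x => x) false
  let n := es.length
  let st :=
    (PySem.List.enumerate es.reverse 1).foldl (stepA n) (0, List.replicate (n + 1) 0)
  es.foldl
    (fun best ev =>
      let endv := PySem.List.pyGetD ev 1 0
      let val := PySem.List.pyGetD ev 2 0
      let idx := PySem.List.bisectLeft (es.map (fun x => PySem.List.pyGetD x 0 0)) (endv + 1)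
      max best (val + PySem.List.pyGetD st.2 (idx : Int) 0))
    0

-- ===== PORT B =====
def maxTwoEvents1_alt (events : List (List Int)) : Int :=
  let es := PySem.List.sorted events (fun x => x) false
  es.foldl
    (fun best ev =>
      let e := PySem.List.pyGetD ev 1 0
      let v := PySem.List.pyGetD ev 2 0
      let partner := es.foldl
        (fun p ev2 =>
          if PySem.List.pyGetD ev2 0 0 > e then max p (PySem.List.pyGetD ev2 2 0) else p)
        0
      max best (v + partner))
    0

-- ===== PRECONDITION & SPEC =====
-- Pre_ excludes exactly the inputs where Python A raises: an inner list whose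
-- length is not 3 makes A's tuple unpacking raise ValueError (or x[0] raise
-- IndexError); A returns normally on every other input.
def Pre_maxTwoEvents1 (events : List (List Int)) : Prop := ∀ e ∈ events, e.length = 3
instance (events : List (List Int)) : Decidable (Pre_maxTwoEvents1 events) := by unfold Pre_maxTwoEvents1; infer_instance
def pvWitness_maxTwoEvents1 : List (List Int) := [[1, 2, 4], [2, 3, 5]]
def Spec_maxTwoEvents1 (events : List (List Int)) (out : Int) : Prop := out = maxTwoEvents1_alt events
instance (events : List (List Int)) (out : Int) : Decidable (Spec_maxTwoEvents1 events out) := by unfold Spec_maxTwoEvents1; infer_instance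

-- ===== CLAIM (what is proved, stated in full; the proofs are below) =====
def Claim_equal_maxTwoEvents1 : Prop := ∀ (events : List (List Int)), Dom_maxTwoEvents1 events → Pre_maxTwoEvents1 events → Spec_maxTwoEvents1 events (maxTwoEvents1 events)

-- ===== LEMMAS AND PROOFS =====

-- `if v > a then v else a` is `max a v`
theorem ifmax_eq_max (a v : Int) : (if v > a then v else a) = max a v := by
  by_cases h : v > a
  · rw [if_pos h]; exact (max_eq_right h.le).symm
  · rw [if_neg h]; exact (max_eq_left (by omega)).symm

-- running max of the value projection, two folds agree
theorem foldl_ifmax_eq_foldl_max (l : List (List Int)) (c : Int) :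
    l.foldl (fun a x => if PySem.List.pyGetD x 2 0 > a then PySem.List.pyGetD x 2 0 else a) c
      = l.foldl (fun a x => max a (PySem.List.pyGetD x 2 0)) c := by
  simp only [ifmax_eq_max]

theorem foldl_max_max (l : List (List Int)) (c d : Int) :
    l.foldl (fun a x => max a (PySem.List.pyGetD x 2 0)) (max c d)
      = max (l.foldl (fun a x => max a (PySem.List.pyGetD x 2 0)) c) d := by
  induction l generalizing c with
  | nil => rfl
  | cons x t ih =>
      simp only [List.foldl_cons]
      rw [max_right_comm c d (PySem.List.pyGetD x 2 0), ih]

theorem foldl_max_reverse (l : List (List Int)) (c : Int) :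
    l.reverse.foldl (fun a x => max a (PySem.List.pyGetD x 2 0)) c
      = l.foldl (fun a x => max a (PySem.List.pyGetD x 2 0)) c := by
  induction l generalizing c with
  | nil => rfl
  | cons x t ih =>
      simp only [List.reverse_cons, List.foldl_append, List.foldl_cons, List.foldl_nil]
      rw [ih, ← foldl_max_max]

-- pySetD with an in-range Nat index is List.set
theorem pySetD_natCast {α : Type} (xs : List α) (m : Nat) (v : α) (h : m < xs.length) :
    PySem.List.pySetD xs (m : Int) v = xs.set m v := by
  simp [PySem.List.pySetD, PySem.List.pySet?, PySem.List.pyIdx?, h]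

-- a list whose elements fail a predicate up to index k and satisfy it from k on
-- filters to its suffix from k
theorem filter_eq_drop {α : Type} (p : α → Bool) :
    ∀ (l : List α) (k : Nat), k ≤ l.length →
    (∀ (j : Nat) (hj : j < l.length), j < k → p l[j] = false) →
    (∀ (j : Nat) (hj : j < l.length), k ≤ j → p l[j] = true) →
    l.filter p = l.drop k := by
  intro l
  induction l with
  | nil => intro k _ _ _; simp
  | cons x t ih =>
      intro k hk hlt hge
      cases k with
      | zero =>
          rw [List.drop_zero, List.filter_eq_self.mpr]
          intro a ha
          obtain ⟨j, hj, rfl⟩ := List.mem_iff_getElem.mp ha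
          exact hge j hj (Nat.zero_le j)
      | succ k' =>
          have hx : p x = false := hlt 0 (by simp) (Nat.succ_pos k')
          rw [List.drop_succ_cons, List.filter_cons_of_neg (by simp [hx])]
          exact ih k' (by simpa using hk)
            (fun j hj hjk => hlt (j + 1) (by simpa using hj) (by omega))
            (fun j hj hjk => hge (j + 1) (by simpa using hj) (by omega))

-- Python's lexicographic list order: first components are monotone
theorem head_le_of_le (a b : List Int) (ha : a.length = 3) (hb : b.length = 3)
    (h : a ≤ b) : PySem.List.pyGetD a 0 0 ≤ PySem.List.pyGetD b 0 0 := by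
  match a, b with
  | a0 :: a', b0 :: b' =>
      simp only [PySem.List.pyGetD_zero_cons]
      by_contra hlt
      push Not at hlt
      exact absurd (List.Lex.rel hlt) (not_lt.mpr h)

-- characterisation of A's first pass: after folding stepA n over
-- enumerate r s (with s + |r| ≤ n + 1), slot k holds the running max (seeded
-- with c) of the values of the first n+1-s-k elements of r; other slots keep mv.
theorem loop1 (n : Nat) (r : List (List Int)) :
    ∀ (s : Nat) (c : Int) (mv : List Int) (k : Nat),
    mv.length = n + 1 → 1 ≤ s → s + r.length ≤ n + 1 → k ≤ n →
    (((PySem.List.enumerate r (s : Int)).foldl (stepA n) (c, mv)).2).getD k 0 =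
      if n + 1 ≤ s + r.length + k ∧ s + k ≤ n then
        (r.take (n + 1 - s - k)).foldl
          (fun a x => if PySem.List.pyGetD x 2 0 > a then PySem.List.pyGetD x 2 0 else a) c
      else mv.getD k 0 := by
  induction r with
  | nil =>
      intro s c mv k hmv hs hsr hk
      simp only [PySem.List.enumerate_nil, List.foldl_nil]
      rw [if_neg (by simp only [List.length_nil]; omega)]
  | cons x r' ih =>
      intro s c mv k hmv hs hsr hk
      have hsr' : s + r'.length + 1 ≤ n + 1 := by
        have := hsr; simp only [List.length_cons] at this; omega
      have hsn : s ≤ n := by omega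
      have hstep : stepA n (c, mv) ((s : Int), x) =
          ((if PySem.List.pyGetD x 2 0 > c then PySem.List.pyGetD x 2 0 else c),
            mv.set (n - s) (if PySem.List.pyGetD x 2 0 > c then PySem.List.pyGetD x 2 0 else c)) := by
        simp only [stepA]
        have hcast : (n : Int) - (s : Int) = ((n - s : Nat) : Int) := by omega
        rw [hcast, pySetD_natCast _ _ _ (by omega)]
      rw [PySem.List.enumerate_cons, List.foldl_cons, hstep]
      have hcast1 : (s : Int) + 1 = ((s + 1 : Nat) : Int) := by push_cast; ring
      rw [hcast1, ih (s + 1) _ _ k (by simpa using hmv) (by omega) (by omega) hk]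
      by_cases h1 : n + 1 ≤ s + 1 + r'.length + k ∧ s + 1 + k ≤ n
      · have hc : n + 1 ≤ s + (x :: r').length + k ∧ s + k ≤ n := by
          simp only [List.length_cons]; omega
        rw [if_pos h1, if_pos hc]
        have ht : n + 1 - s - k = (n - s - k) + 1 := by omega
        have ht' : n + 1 - (s + 1) - k = n - s - k := by omega
        rw [ht, ht', List.take_succ_cons, List.foldl_cons]
      · rw [if_neg h1]
        by_cases h2 : k = n - s
        · subst h2
          have hc : n + 1 ≤ s + (x :: r').length + (n - s) ∧ s + (n - s) ≤ n := by
            simp only [List.length_cons]; omega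
          rw [if_pos hc]
          have h3 : n + 1 - s - (n - s) = 1 := by omega
          rw [h3]
          simp only [List.take_succ_cons, List.take_zero, List.foldl_cons, List.foldl_nil]
          have hrange : n - s < mv.length := by omega
          simp [List.getD, List.getElem?_set_self hrange]
        · have hc : ¬(n + 1 ≤ s + (x :: r').length + k ∧ s + k ≤ n) := by
            simp only [List.length_cons]; omega
          rw [if_neg hc]
          simp [List.getD, List.getElem?_set_ne (Ne.symm h2)]

-- the per-event term of A equals the per-event term of B
theorem term_eq (events : List (List Int)) (hpre : Pre_maxTwoEvents1 events)
    (ev : List Int) :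
    PySem.List.pyGetD
      (((PySem.List.enumerate (PySem.List.sorted events (fun x => x) false).reverse 1).foldl
          (stepA (PySem.List.sorted events (fun x => x) false).length)
          (0, List.replicate ((PySem.List.sorted events (fun x => x) false).length + 1) 0)).2)
      ((PySem.List.bisectLeft
          ((PySem.List.sorted events (fun x => x) false).map (fun x => PySem.List.pyGetD x 0 0))
          (PySem.List.pyGetD ev 1 0 + 1) : Nat) : Int) 0
      = (PySem.List.sorted events (fun x => x) false).foldl
          (fun p ev2 =>
            if PySem.List.pyGetD ev2 0 0 > PySem.List.pyGetD ev 1 0 then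
              max p (PySem.List.pyGetD ev2 2 0)
            else p) 0 := by
  set es := PySem.List.sorted events (fun x => x) false with hes
  set e := PySem.List.pyGetD ev 1 0 with he
  set n := es.length with hn
  have hlen3 : ∀ x ∈ es, x.length = 3 := fun x hx =>
    hpre x ((PySem.List.mem_sorted events (fun x => x) false x).mp hx)
  have hbridge : es = @PySem.List.sorted (List Int) (List Int) _
      (@LinearOrder.toDecidableLT _ List.instLinearOrder) events (fun x => x) false := by
    rw [hes]; congr 1
  have hsorted : es.Pairwise (· ≤ ·) := by
    rw [hbridge]
    exact PySem.List.sorted_pairwise events (fun x => x)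
  have hheads : (es.map (fun x => PySem.List.pyGetD x 0 0)).Pairwise (· ≤ ·) := by
    rw [List.pairwise_map]
    exact hsorted.imp_of_mem (fun {a b} ha hb hab =>
      head_le_of_le a b (hlen3 a ha) (hlen3 b hb) hab)
  obtain ⟨hble, hblt, hbge⟩ :=
    PySem.List.bisectLeft_spec (es.map (fun x => PySem.List.pyGetD x 0 0)) (e + 1) hheads
  set idx := PySem.List.bisectLeft (es.map (fun x => PySem.List.pyGetD x 0 0)) (e + 1) with hidx
  have hlenmap : (es.map (fun x => PySem.List.pyGetD x 0 0)).length = n := List.length_map ..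
  have hidxn : idx ≤ n := by rw [← hlenmap]; exact hble
  -- A's table lookup is the running max of the values of the suffix es[idx:]
  have hA : (((PySem.List.enumerate es.reverse 1).foldl (stepA n)
        (0, List.replicate (n + 1) 0)).2).getD idx 0 =
      (es.drop idx).foldl (fun a x => max a (PySem.List.pyGetD x 2 0)) 0 := by
    have hone : ((1 : Nat) : Int) = (1 : Int) := rfl
    rw [← hone, loop1 n es.reverse 1 0 (List.replicate (n + 1) 0) idx
      (by simp) le_rfl (by simp only [List.length_reverse, hn]; omega) hidxn]
    by_cases hlt : idx < n
    · have hc : n + 1 ≤ 1 + es.reverse.length + idx ∧ 1 + idx ≤ n := by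
        simp only [List.length_reverse, ← hn]; omega
      rw [if_pos hc]
      have ht : n + 1 - 1 - idx = n - idx := by omega
      rw [ht, List.take_reverse]
      have ht2 : es.length - (n - idx) = idx := by omega
      rw [ht2, foldl_ifmax_eq_foldl_max, foldl_max_reverse]
    · have hc : ¬(n + 1 ≤ 1 + es.reverse.length + idx ∧ 1 + idx ≤ n) := by
        simp only [List.length_reverse, ← hn]; omega
      rw [if_neg hc]
      have hidxeq : idx = n := by omega
      rw [hidxeq, hn, List.drop_length, List.foldl_nil]
      simp [List.getD]
  -- B's inner loop is the same running max
  have hB : es.foldl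
      (fun p ev2 =>
        if PySem.List.pyGetD ev2 0 0 > e then max p (PySem.List.pyGetD ev2 2 0) else p) 0 =
      (es.drop idx).foldl (fun a x => max a (PySem.List.pyGetD x 2 0)) 0 := by
    rw [PySem.List.foldl_ite_eq_foldl_filter (fun ev2 => PySem.List.pyGetD ev2 0 0 > e)
      (fun p y => max p (PySem.List.pyGetD y 2 0)) es 0]
    congr 1
    refine filter_eq_drop _ es idx hidxn ?_ ?_
    · intro j hj hjk
      have hj' : j < (es.map (fun x => PySem.List.pyGetD x 0 0)).length := by
        rw [hlenmap]; exact hj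
      have := hblt j hj' hjk
      simp only [List.getElem_map] at this
      simp only [decide_eq_false_iff_not, not_lt]
      omega
    · intro j hj hjk
      have hj' : j < (es.map (fun x => PySem.List.pyGetD x 0 0)).length := by
        rw [hlenmap]; exact hj
      have := hbge j hj' hjk
      simp only [List.getElem_map] at this
      simp only [decide_eq_true_eq]
      omega
  rw [PySem.List.pyGetD_natCast, hB, ← hA]


-- ===== VERDICT (by name: the statement is the Claim_ definition above) =====
theorem maxTwoEvents1_spec : Claim_equal_maxTwoEvents1 := by
  intro events _hdom hpre
  unfold Spec_maxTwoEvents1 maxTwoEvents1 maxTwoEvents1_alt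
  simp only []
  refine PySem.List.foldl_congr_mem _ _ _ _ ?_
  intro best ev _hev
  rw [term_eq events hpre ev]
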